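-- pv_equiv track=rewrite | github.com/adri711/Tic-tac-toe711 | Tic-tac-toe-AI.py | multiple_char_check
-- ===== SOURCE A (Python) =====
-- def multiple_char_check(text):
-- 	result = True
-- 	if len(text) != 0 and len(text) != 1:
-- 		last_char = text[0]
-- 		for char in text:
-- 			if char != last_char:
-- 				result = False
-- 				break
-- 			last_char = char
-- 	return result
-- ===== SOURCE B (Python) =====
-- def multiple_char_check(text):
--     return len(set(text)) <= 1
-- ===== Notes on version B (the rewrite author's own statement) =====
-- stated objective: simpler
-- what changed: Replaces the running last_char comparison loop with a break and result flag by building the set of distinct characters once and checking its size is at most 1.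
import Mathlib
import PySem

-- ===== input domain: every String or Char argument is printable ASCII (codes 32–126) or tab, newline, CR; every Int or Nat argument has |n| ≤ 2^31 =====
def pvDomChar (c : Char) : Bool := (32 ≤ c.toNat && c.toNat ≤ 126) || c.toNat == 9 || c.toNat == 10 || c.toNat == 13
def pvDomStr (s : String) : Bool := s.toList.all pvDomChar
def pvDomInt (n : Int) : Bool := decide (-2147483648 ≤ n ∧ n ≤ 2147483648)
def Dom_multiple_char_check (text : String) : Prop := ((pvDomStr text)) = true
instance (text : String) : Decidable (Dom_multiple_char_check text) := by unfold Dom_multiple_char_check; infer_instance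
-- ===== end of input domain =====

-- B replaces A's last_char comparison loop (with flag and break) by set(text) size ≤ 1: simpler, same cost.


-- ===== PORT A =====
-- the 'for char in text' loop with the break and the last_char update
def mccLoop (last : Char) (cs : List Char) : Bool :=
  match cs with
  | [] => true
  | c :: rest => if c != last then false else mccLoop c rest

def multiple_char_check (text : String) : Bool :=
  let cs := text.toList
  if cs.length ≠ 0 ∧ cs.length ≠ 1 then
    match cs with
    | [] => true            -- unreachable: the guard gives cs.length ≠ 0
    | c0 :: _ => mccLoop c0 cs   -- last_char = text[0], then the loop over all of text
  else true

-- ===== PORT B =====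
def multiple_char_check_alt (text : String) : Bool :=
  decide ((PySem.Set.ofList text.toList).length ≤ 1)

-- ===== PRECONDITION & SPEC =====
def Spec_multiple_char_check (text : String) (out : Bool) : Prop := out = multiple_char_check_alt text
instance (text : String) (out : Bool) : Decidable (Spec_multiple_char_check text out) := by unfold Spec_multiple_char_check; infer_instance

-- ===== CLAIM (what is proved, stated in full; the proofs are below) =====
def Claim_equal_multiple_char_check : Prop := ∀ (text : String), Dom_multiple_char_check text → Spec_multiple_char_check text (multiple_char_check text)

-- ===== LEMMAS AND PROOFS =====

theorem mccLoop_eq_all (last : Char) (cs : List Char) :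
    mccLoop last cs = cs.all (· == last) := by
  induction cs generalizing last with
  | nil => rfl
  | cons c rest ih =>
    simp only [mccLoop, List.all_cons]
    by_cases h : c = last
    · subst h; simp [ih]
    · simp [h, bne_iff_ne, beq_iff_eq]

theorem ofList_const (c0 : Char) (rest : List Char)
    (h : ∀ x ∈ rest, x = c0) :
    List.foldl PySem.Set.add [c0] rest = [c0] := by
  induction rest with
  | nil => rfl
  | cons x xs ih =>
    have hx : x = c0 := h x (by simp)
    subst hx
    simp only [List.foldl_cons]
    have : PySem.Set.add [x] x = [x] := by simp [PySem.Set.add, PySem.Set.contains]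
    rw [this]
    exact ih (fun y hy => h y (by simp [hy]))

theorem set_le_one_iff (c0 : Char) (rest : List Char) :
    ((PySem.Set.ofList (c0 :: rest)).length ≤ 1) ↔ (∀ x ∈ rest, x = c0) := by
  constructor
  · intro hlen x hx
    have hc0 : c0 ∈ PySem.Set.ofList (c0 :: rest) := by
      rw [PySem.Set.mem_ofList]; simp
    have hxmem : x ∈ PySem.Set.ofList (c0 :: rest) := by
      rw [PySem.Set.mem_ofList]; simp [hx]
    match hS : PySem.Set.ofList (c0 :: rest) with
    | [] => rw [hS] at hc0; simp at hc0
    | [a] =>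
      rw [hS] at hc0 hxmem
      simp at hc0 hxmem
      rw [hxmem, hc0]
    | a :: b :: t => rw [hS] at hlen; simp at hlen
  · intro h
    have : PySem.Set.ofList (c0 :: rest) = [c0] := by
      rw [PySem.Set.ofList_eq_foldl]
      simp only [List.foldl_cons]
      have : PySem.Set.add [] c0 = [c0] := rfl
      rw [this]
      exact ofList_const c0 rest h
    rw [this]; simp

-- ===== VERDICT (by name: the statement is the Claim_ definition above) =====
theorem multiple_char_check_spec : Claim_equal_multiple_char_check := by
  intro text _
  unfold Spec_multiple_char_check multiple_char_check multiple_char_check_alt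
  match h : text.toList with
  | [] => simp
  | [c] => simp [PySem.Set.ofList]
  | c0 :: c1 :: rest =>
    simp only [List.length_cons]
    rw [if_pos (by omega)]
    rw [mccLoop_eq_all]
    simp only [List.all_cons, beq_self_eq_true, Bool.true_and]
    by_cases hall : ∀ x ∈ c1 :: rest, x = c0
    · rw [decide_eq_true ((set_le_one_iff c0 (c1 :: rest)).mpr hall)]
      simpa [List.all_eq_true, beq_iff_eq] using hall
    · rw [decide_eq_false (fun hh => hall ((set_le_one_iff c0 (c1 :: rest)).mp hh))]
      rw [Bool.eq_false_iff]
      simpa [List.all_eq_true, beq_iff_eq] using hall
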